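-- pv_equiv track=rewrite | github.com/emanivinay/adventofcode | 2016/day7.py | parse_inner_outer_parts
-- ===== SOURCE A (Python) =====
-- def parse_inner_outer_parts(s):
--     inside = False
--     inner, outer, part = [], [], []
--     for c in s.strip():
--         if c == '[':
--             if part:
--                 outer.append(''.join(part))
--             inside = True
--             part = []
--         elif c == ']':
--             if part:
--                 inner.append(''.join(part))
--             inside = False
--             part = []
--         else:
--             part.append(c)
--
--     if part:
--         outer.append(''.join(part))
--     return (inner, outer)
-- ===== SOURCE B (Python) =====
-- def parse_inner_outer_parts(s):
--     inner, outer = [], []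
--     rest = s.strip()
--     while rest:
--         k = 0
--         while k < len(rest) and rest[k] not in '[]':
--             k += 1
--         seg, delim, rest = rest[:k], rest[k:k+1], rest[k+1:]
--         if seg:
--             (inner if delim == ']' else outer).append(seg)
--     return (inner, outer)
-- ===== Notes on version B (the rewrite author's own statement) =====
-- stated objective: simpler
-- what changed: A walks the string character by character, buffering a growing `part` list and a dead `inside` flag; B repeatedly slices the remaining string at the next bracket and classifies each whole non-empty segment by the bracket that ends it (']' -> inner, otherwise outer).
import Mathlib
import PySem

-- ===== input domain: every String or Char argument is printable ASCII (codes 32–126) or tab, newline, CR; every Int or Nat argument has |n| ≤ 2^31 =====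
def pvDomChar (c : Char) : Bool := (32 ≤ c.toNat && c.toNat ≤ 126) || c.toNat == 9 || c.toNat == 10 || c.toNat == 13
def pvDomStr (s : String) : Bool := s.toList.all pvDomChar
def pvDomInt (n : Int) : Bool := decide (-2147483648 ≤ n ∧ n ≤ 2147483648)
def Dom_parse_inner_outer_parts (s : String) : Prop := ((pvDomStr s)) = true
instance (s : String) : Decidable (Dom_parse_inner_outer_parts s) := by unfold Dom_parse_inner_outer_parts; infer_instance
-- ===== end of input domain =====

-- B replaces A's char-by-char loop (with its running `part` buffer and dead `inside` flag)
-- by a segment scanner: slice up to the next bracket and classify the slice by that bracket; objective: simpler.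

-- ===== PORT A =====
-- A's loop state: (inside, inner, outer, part); 'inside' is kept although A never reads it.
def pvStepA (st : Bool × List String × List String × List Char) (c : Char) :
    Bool × List String × List String × List Char :=
  let (_inside, inner, outer, part) := st
  if c == '[' then
    (true, inner, (if part ≠ [] then outer ++ [String.ofList part] else outer), [])
  else if c == ']' then
    (false, (if part ≠ [] then inner ++ [String.ofList part] else inner), outer, [])
  else
    (_inside, inner, outer, part ++ [c])

def parse_inner_outer_parts (s : String) : List String × List String :=
  let st := (PySem.Chars.strip s.toList).foldl pvStepA (false, [], [], [])
  (st.2.1, if st.2.2.2 ≠ [] then st.2.2.1 ++ [String.ofList st.2.2.2] else st.2.2.1)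

-- ===== PORT B =====
def pvIsDelim (c : Char) : Bool := c == '[' || c == ']'

-- the inner scan 'while k < len(rest) and rest[k] not in "[]": k += 1'
def pvScanB : List Char → Nat
  | [] => 0
  | c :: r => if pvIsDelim c then 0 else pvScanB r + 1

-- the outer 'while rest:' loop of Source B, with its two accumulators
def pvGoB (rest : List Char) (inner outer : List String) : List String × List String :=
  if _hre : rest = [] then (inner, outer)
  else
    let k := pvScanB rest
    let seg := rest.take k
    let delim := (rest.drop k).take 1
    let rest' := rest.drop (k + 1)
    if seg ≠ [] then
      if delim == [']'] then pvGoB rest' (inner ++ [String.ofList seg]) outer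
      else pvGoB rest' inner (outer ++ [String.ofList seg])
    else pvGoB rest' inner outer
  termination_by rest.length
  decreasing_by
    all_goals
      cases rest with
      | nil => exact absurd rfl _hre
      | cons a t =>
          simp only [List.length_drop, List.length_cons]
          omega

def parse_inner_outer_parts_alt (s : String) : List String × List String :=
  pvGoB (PySem.Chars.strip s.toList) [] []

-- ===== PRECONDITION & SPEC =====
def Spec_parse_inner_outer_parts (s : String) (out : List String × List String) : Prop := out = parse_inner_outer_parts_alt s
instance (s : String) (out : List String × List String) : Decidable (Spec_parse_inner_outer_parts s out) := by unfold Spec_parse_inner_outer_parts; infer_instance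

-- ===== CLAIM (what is proved, stated in full; the proofs are below) =====
def Claim_equal_parse_inner_outer_parts : Prop := ∀ (s : String), Dom_parse_inner_outer_parts s → Spec_parse_inner_outer_parts s (parse_inner_outer_parts s)

-- ===== LEMMAS AND PROOFS =====

lemma pvScanB_append_all {part : List Char} (h : ∀ c ∈ part, pvIsDelim c = false)
    (l : List Char) : pvScanB (part ++ l) = part.length + pvScanB l := by
  induction part with
  | nil => simp only [List.nil_append, List.length_nil, Nat.zero_add]
  | cons a t ih =>
      have ha := h a (by simp)
      simp only [List.cons_append, pvScanB, ha, Bool.false_eq_true, if_false]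
      rw [ih (fun c hc => h c (by simp [hc]))]
      simp only [List.length_cons]
      omega

lemma pvDrop_append_cons (part : List Char) (c : Char) (t : List Char) :
    (part ++ c :: t).drop (part.length + 1) = t := by
  have h : part ++ c :: t = (part ++ [c]) ++ t := by simp
  rw [h]
  have hlen : (part ++ [c]).length = part.length + 1 := by simp
  rw [← hlen]
  exact List.drop_left

-- one step of B's loop when the rest starts with a bracket-free block followed by a bracket
lemma pvGoB_eval (part : List Char) (hp : ∀ c ∈ part, pvIsDelim c = false)
    (d : Char) (hd : pvIsDelim d = true) (t : List Char) (inner outer : List String) :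
    pvGoB (part ++ d :: t) inner outer =
      if part ≠ [] then
        (if d = ']' then pvGoB t (inner ++ [String.ofList part]) outer
         else pvGoB t inner (outer ++ [String.ofList part]))
      else pvGoB t inner outer := by
  rw [pvGoB]
  have hscan : pvScanB (part ++ d :: t) = part.length := by
    rw [pvScanB_append_all hp]; simp [pvScanB, hd]
  simp only [dif_neg (by simp : ¬(part ++ d :: t = [])), hscan,
    List.take_left, List.drop_left, pvDrop_append_cons]
  by_cases hpe : part = []
  · simp [hpe]
  · rw [if_pos hpe, if_pos hpe]
    by_cases hd' : d = ']'
    · rw [if_pos (by simp [hd'] : (List.take 1 (d :: t) == [']']) = true), if_pos hd']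
    · rw [if_neg (by simp [hd'] : ¬(List.take 1 (d :: t) == [']']) = true), if_neg hd']

-- B's loop on a bracket-free remainder
lemma pvGoB_final (part : List Char) (hp : ∀ c ∈ part, pvIsDelim c = false)
    (inner outer : List String) :
    pvGoB part inner outer
      = (inner, if part ≠ [] then outer ++ [String.ofList part] else outer) := by
  by_cases hpe : part = []
  · subst hpe; rw [pvGoB]; simp
  · rw [pvGoB]
    have hscan : pvScanB part = part.length := by
      simpa using pvScanB_append_all hp ([] : List Char)
    simp only [dif_neg hpe, hscan, List.take_length, List.drop_length, List.take_nil,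
      List.drop_eq_nil_of_le (by omega : part.length ≤ part.length + 1)]
    rw [if_pos hpe, if_neg (by decide : ¬(([] : List Char) == [']']) = true)]
    rw [pvGoB]
    simp [hpe]

-- A's loop from state (inside, inner, outer, part), after finalization, equals B's
-- segment loop on part ++ t with the same accumulators (part holds no brackets).
lemma pvLoop_eq (t : List Char) : ∀ (part : List Char),
    (∀ c ∈ part, pvIsDelim c = false) → ∀ (inside : Bool) (inner outer : List String),
    ((t.foldl pvStepA (inside, inner, outer, part)).2.1,
      if (t.foldl pvStepA (inside, inner, outer, part)).2.2.2 ≠ [] then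
        (t.foldl pvStepA (inside, inner, outer, part)).2.2.1
          ++ [String.ofList (t.foldl pvStepA (inside, inner, outer, part)).2.2.2]
      else (t.foldl pvStepA (inside, inner, outer, part)).2.2.1)
      = pvGoB (part ++ t) inner outer := by
  induction t with
  | nil =>
      intro part hp inside inner outer
      simp only [List.foldl_nil, List.append_nil]
      rw [pvGoB_final part hp]
  | cons c t ih =>
      intro part hp inside inner outer
      by_cases hc1 : c = '['
      · subst hc1
        have hstep : pvStepA (inside, inner, outer, part) '['
            = (true, inner, (if part ≠ [] then outer ++ [String.ofList part] else outer), []) := by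
          simp [pvStepA]
        rw [List.foldl_cons, hstep, ih [] (by simp) true inner _,
          pvGoB_eval part hp '[' (by decide) t inner outer]
        by_cases hpe : part = []
        · simp [hpe]
        · rw [if_pos hpe, if_neg (by decide : ¬('[' = ']')), if_pos hpe]
          simp
      · by_cases hc2 : c = ']'
        · subst hc2
          have hstep : pvStepA (inside, inner, outer, part) ']'
              = (false, (if part ≠ [] then inner ++ [String.ofList part] else inner), outer, []) := by
            simp [pvStepA]
          rw [List.foldl_cons, hstep, ih [] (by simp) false _ outer,
            pvGoB_eval part hp ']' (by decide) t inner outer]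
          by_cases hpe : part = []
          · simp [hpe]
          · rw [if_pos hpe, if_pos rfl, if_pos hpe]
            simp
        · have hstep : pvStepA (inside, inner, outer, part) c
              = (inside, inner, outer, part ++ [c]) := by
            simp [pvStepA, hc1, hc2]
          have hcall : ∀ x ∈ part ++ [c], pvIsDelim x = false := by
            intro x hx
            rcases List.mem_append.1 hx with hx | hx
            · exact hp x hx
            · simp only [List.mem_singleton] at hx
              subst hx; simp [pvIsDelim, hc1, hc2]
          rw [List.foldl_cons, hstep, ih (part ++ [c]) hcall inside inner outer]
          simp

-- ===== VERDICT (by name: the statement is the Claim_ definition above) =====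
theorem parse_inner_outer_parts_spec : Claim_equal_parse_inner_outer_parts := by
  intro s _
  show _ = _
  unfold parse_inner_outer_parts parse_inner_outer_parts_alt
  simpa using pvLoop_eq (PySem.Chars.strip s.toList) [] (by simp) false [] []
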